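-- pv_equiv track=rewrite | github.com/biztechprogramming/bond | backend/app/foundations/workspace_graph/phase2_extractors.py | _guess_tested_file
-- ===== SOURCE A (Python) =====
-- def _guess_tested_file(test_path: str) -> str | None:
--     """Heuristic: test_foo.py likely tests foo.py in a parallel path."""
--     parts = test_path.replace("\\", "/").split("/")
--     name = parts[-1]
--
--     # Python: test_foo.py -> foo.py
--     if name.startswith("test_") and name.endswith(".py"):
--         candidate = name[5:]  # strip test_
--         # Try replacing tests/ with src/ or removing tests/ dir
--         new_parts = [p if p not in ("tests", "test") else "app" for p in parts[:-1]]
--         return "/".join(new_parts + [candidate])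
--
--     # JS/TS: foo.test.ts -> foo.ts, foo.spec.ts -> foo.ts
--     for suffix in (".test.ts", ".test.js", ".spec.ts", ".spec.js",
--                     ".test.tsx", ".test.jsx", ".spec.tsx", ".spec.jsx"):
--         if name.endswith(suffix):
--             base_ext = suffix.split(".")[-1]
--             candidate = name[: -len(suffix)] + "." + base_ext
--             new_parts = [p for p in parts[:-1] if p not in ("__tests__", "test", "tests", "spec")]
--             return "/".join(new_parts + [candidate])
--
--     return None
-- ===== SOURCE B (Python) =====
-- def _guess_tested_file(test_path: str) -> str | None:
--     """Heuristic: test_foo.py likely tests foo.py in a parallel path."""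
--     parts = test_path.replace("\\", "/").split("/")
--     name = parts[-1]
--
--     # Python: test_foo.py -> foo.py
--     if name.startswith("test_") and name.endswith(".py"):
--         candidate = name[5:]
--         new_parts = [p if p not in ("tests", "test") else "app" for p in parts[:-1]]
--         return "/".join(new_parts + [candidate])
--
--     # JS/TS: parse the dotted name instead of testing explicit suffixes
--     dotparts = name.split(".")
--     if len(dotparts) >= 3 and dotparts[-2] in ("test", "spec") and dotparts[-1] in ("ts", "js", "tsx", "jsx"):
--         candidate = ".".join(dotparts[:-2]) + "." + dotparts[-1]
--         new_parts = [p for p in parts[:-1] if p not in ("__tests__", "test", "tests", "spec")]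
--         return "/".join(new_parts + [candidate])
--
--     return None
-- ===== Notes on version B (the rewrite author's own statement) =====
-- stated objective: idiomatic
-- what changed: The JS/TS branch parses the file name by one split on the dot character and checks the last two dotted components against {test,spec} and {ts,js,tsx,jsx}, replacing A's loop over 8 hard-coded suffix strings with endswith tests.
import Mathlib
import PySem

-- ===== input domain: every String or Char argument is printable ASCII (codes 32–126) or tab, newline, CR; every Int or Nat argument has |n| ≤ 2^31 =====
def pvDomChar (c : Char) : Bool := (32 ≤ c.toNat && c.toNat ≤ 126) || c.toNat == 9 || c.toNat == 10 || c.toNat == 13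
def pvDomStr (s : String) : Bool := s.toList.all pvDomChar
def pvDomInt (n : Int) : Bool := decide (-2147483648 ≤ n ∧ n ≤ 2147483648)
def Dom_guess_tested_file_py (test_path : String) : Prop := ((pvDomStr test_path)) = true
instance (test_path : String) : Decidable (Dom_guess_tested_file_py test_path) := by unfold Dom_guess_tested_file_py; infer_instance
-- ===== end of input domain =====

-- B parses the dotted file name (one split on the dot character) instead of A's loop over 8 explicit suffixes; objective: idiomatic, same cost.

-- ===== PORT A =====
def pvSuffixes : List (List Char) :=
  [".test.ts".toList, ".test.js".toList, ".spec.ts".toList, ".spec.js".toList,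
   ".test.tsx".toList, ".test.jsx".toList, ".spec.tsx".toList, ".spec.jsx".toList]

-- A's for-loop over the 8 suffixes, with its early return
def pvJsLoopA (parts : List (List Char)) (name : List Char) : List (List Char) → Option String
  | [] => none
  | suf :: rest =>
    if PySem.Chars.endswith name suf then
      let baseExt := (PySem.List.pyGet? (PySem.Chars.splitOn suf ['.']) (-1)).getD []
      let candidate := PySem.List.slice name none (some (-(suf.length : Int))) ++ '.' :: baseExt
      let newParts := (PySem.List.slice parts none (some (-1))).filter
        (fun p => !decide (p ∈ ["__tests__".toList, "test".toList, "tests".toList, "spec".toList]))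
      some (String.ofList (PySem.Chars.join ['/'] (newParts ++ [candidate])))
    else pvJsLoopA parts name rest

def guess_tested_file_py (test_path : String) : Option String :=
  let parts := PySem.Chars.splitOn (PySem.Chars.replace test_path.toList ['\\'] ['/']) ['/']
  -- parts[-1]: split never returns an empty list, so Python's parts[-1] never raises (pvSplitOn_eq and pvSplit_ne_nil below)
  let name := (PySem.List.pyGet? parts (-1)).getD []
  if PySem.Chars.startswith name "test_".toList && PySem.Chars.endswith name ".py".toList then
    let candidate := PySem.List.slice name (some 5) none
    let newParts := (PySem.List.slice parts none (some (-1))).map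
      (fun p => if p ∈ ["tests".toList, "test".toList] then "app".toList else p)
    some (String.ofList (PySem.Chars.join ['/'] (newParts ++ [candidate])))
  else
    pvJsLoopA parts name pvSuffixes

-- ===== PORT B =====
def guess_tested_file_py_alt (test_path : String) : Option String :=
  let parts := PySem.Chars.splitOn (PySem.Chars.replace test_path.toList ['\\'] ['/']) ['/']
  let name := (PySem.List.pyGet? parts (-1)).getD []
  if PySem.Chars.startswith name "test_".toList && PySem.Chars.endswith name ".py".toList then
    let candidate := PySem.List.slice name (some 5) none
    let newParts := (PySem.List.slice parts none (some (-1))).map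
      (fun p => if p ∈ ["tests".toList, "test".toList] then "app".toList else p)
    some (String.ofList (PySem.Chars.join ['/'] (newParts ++ [candidate])))
  else
    let dotparts := PySem.Chars.splitOn name ['.']
    if 3 ≤ dotparts.length ∧
        (PySem.List.pyGet? dotparts (-2)).getD [] ∈ ["test".toList, "spec".toList] ∧
        (PySem.List.pyGet? dotparts (-1)).getD [] ∈ ["ts".toList, "js".toList, "tsx".toList, "jsx".toList] then
      let candidate := PySem.Chars.join ['.'] (PySem.List.slice dotparts none (some (-2))) ++
        '.' :: (PySem.List.pyGet? dotparts (-1)).getD []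
      let newParts := (PySem.List.slice parts none (some (-1))).filter
        (fun p => !decide (p ∈ ["__tests__".toList, "test".toList, "tests".toList, "spec".toList]))
      some (String.ofList (PySem.Chars.join ['/'] (newParts ++ [candidate])))
    else none

-- ===== PRECONDITION & SPEC =====
def Spec_guess_tested_file_py (test_path : String) (out : Option String) : Prop := out = guess_tested_file_py_alt test_path
instance (test_path : String) (out : Option String) : Decidable (Spec_guess_tested_file_py test_path out) := by unfold Spec_guess_tested_file_py; infer_instance

-- ===== CLAIM (what is proved, stated in full; the proofs are below) =====
def Claim_equal_guess_tested_file_py : Prop := ∀ (test_path : String), Dom_guess_tested_file_py test_path → Spec_guess_tested_file_py test_path (guess_tested_file_py test_path)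

-- ===== LEMMAS AND PROOFS =====

-- a plain structural version of Python's single-character split
def pvSplit (c : Char) (pre : List Char) : List Char → List (List Char)
  | [] => [pre]
  | x :: rest => if x = c then pre :: pvSplit c [] rest else pvSplit c (pre ++ [x]) rest

theorem pvGo_spec (c : Char) : ∀ (fuel : Nat) (l cur : List Char) (acc : List (List Char)),
    l.length ≤ fuel →
    PySem.Chars.splitOn.go [c] fuel l cur acc = acc.reverse ++ pvSplit c cur.reverse l := by
  intro fuel
  induction fuel with
  | zero =>
    intro l cur acc h
    have : l = [] := List.eq_nil_of_length_eq_zero (Nat.le_zero.mp h)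
    subst this
    rw [PySem.Chars.splitOn.go]
    simp [pvSplit]
  | succ n ih =>
    intro l cur acc h
    cases l with
    | nil =>
      rw [PySem.Chars.splitOn.go]
      simp [pvSplit]
      omega
    | cons x rest =>
      rw [PySem.Chars.splitOn.go]
      by_cases hx : x = c
      · subst hx
        simp only [List.isPrefixOf, Bool.and_true, beq_self_eq_true, if_pos]
        rw [ih _ _ _ (by simpa using Nat.le_of_succ_le_succ h)]
        simp [pvSplit]
      · have : ([c].isPrefixOf (x :: rest)) = false := by
          simp [List.isPrefixOf]
          exact fun hc => hx hc.symm
        rw [this]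
        simp only [Bool.false_eq_true, if_false]
        rw [ih _ _ _ (by simpa using Nat.le_of_succ_le_succ h)]
        simp [pvSplit, hx]

theorem pvSplitOn_eq (s : List Char) (c : Char) :
    PySem.Chars.splitOn s [c] = pvSplit c [] s := by
  show PySem.Chars.splitOn.go [c] (s.length + 1) s [] [] = _
  rw [pvGo_spec c (s.length + 1) s [] [] (Nat.le_succ _)]
  simp

theorem pvSplit_ne_nil (c : Char) : ∀ (s pre : List Char), pvSplit c pre s ≠ [] := by
  intro s
  induction s with
  | nil => intro pre; simp [pvSplit]
  | cons x rest ih =>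
    intro pre
    by_cases hx : x = c <;> simp [pvSplit, hx] <;> exact ih _

theorem pvSplit_no_sep (c : Char) : ∀ (b pre : List Char), c ∉ b → pvSplit c pre b = [pre ++ b] := by
  intro b
  induction b with
  | nil => intro pre _; simp [pvSplit]
  | cons x rest ih =>
    intro pre h
    have hx : x ≠ c := fun he => h (he ▸ List.mem_cons_self ..)
    simp only [pvSplit, if_neg hx]
    rw [ih _ (fun hm => h (List.mem_cons_of_mem _ hm))]
    simp

theorem pvSplit_append (c : Char) (b : List Char) (hb : c ∉ b) :
    ∀ (a pre : List Char), pvSplit c pre (a ++ c :: b) = pvSplit c pre a ++ [b] := by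
  intro a
  induction a with
  | nil =>
    intro pre
    simp only [List.nil_append, pvSplit, if_pos rfl]
    rw [pvSplit_no_sep c b [] hb]
    simp [pvSplit]
  | cons x rest ih =>
    intro pre
    by_cases hx : x = c <;> simp [pvSplit, hx, ih]

theorem pvJoin_pvSplit (c : Char) : ∀ (s pre : List Char),
    PySem.Chars.join [c] (pvSplit c pre s) = pre ++ s := by
  intro s
  induction s with
  | nil => intro pre; simp [pvSplit, PySem.Chars.join_singleton]
  | cons x rest ih =>
    intro pre
    by_cases hx : x = c
    · subst hx
      rw [show pvSplit x pre (x :: rest) = pre :: pvSplit x [] rest from by simp [pvSplit]]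
      rcases hq : pvSplit x [] rest with _ | ⟨q, t⟩
      · exact absurd hq (pvSplit_ne_nil x rest [])
      · rw [PySem.Chars.join_cons_cons]
        have h5 := ih ([] : List Char)
        rw [hq] at h5
        rw [h5]
        simp
    · simp only [pvSplit, if_neg hx]
      rw [ih]
      simp

theorem pvJoin_concat2 (c : Char) (m e : List Char) :
    ∀ (xs : List (List Char)), xs ≠ [] →
    PySem.Chars.join [c] (xs ++ [m, e]) = PySem.Chars.join [c] xs ++ c :: m ++ c :: e := by
  intro xs
  induction xs with
  | nil => intro h; exact absurd rfl h
  | cons x t ih =>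
    intro _
    cases t with
    | nil =>
      rw [List.cons_append, List.nil_append, PySem.Chars.join_cons_cons,
        PySem.Chars.join_cons_cons, PySem.Chars.join_singleton, PySem.Chars.join_singleton]
      simp
    | cons y t' =>
      rw [List.cons_append, List.cons_append, PySem.Chars.join_cons_cons,
        PySem.Chars.join_cons_cons, ← List.cons_append, ih (by simp)]
      simp

theorem pvConcat2 {α : Type} (l : List α) (h : 3 ≤ l.length) :
    ∃ front m e, l = front ++ [m, e] ∧ front ≠ [] := by
  rcases List.eq_nil_or_concat l with h0 | ⟨t, e, ht⟩
  · subst h0; simp at h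
  · rcases List.eq_nil_or_concat t with h1 | ⟨t', m, ht'⟩
    · subst ht; subst h1; simp at h
    · refine ⟨t', m, e, by simp [ht, ht'], ?_⟩
      intro hn
      subst ht; subst ht'; subst hn; simp at h

theorem pvGet_neg1 {α : Type} (front : List α) (m e : α) :
    PySem.List.pyGet? (front ++ [m, e]) (-1) = some e := by
  simp only [PySem.List.pyGet?, PySem.List.pyIdx?, List.length_append, List.length_cons,
    List.length_nil]
  split_ifs with h1 h2 <;> try (exfalso; omega)
  have h3 : front.length + (0 + 1 + 1) - (-(-1 : Int)).toNat = front.length + 1 := by omega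
  rw [h3]
  simp only [Option.bind_some]
  rw [List.getElem?_append_right (by omega)]
  simp

theorem pvGet_neg2 {α : Type} (front : List α) (m e : α) :
    PySem.List.pyGet? (front ++ [m, e]) (-2) = some m := by
  simp only [PySem.List.pyGet?, PySem.List.pyIdx?, List.length_append, List.length_cons,
    List.length_nil]
  split_ifs with h1 h2 <;> try (exfalso; omega)
  have h3 : front.length + (0 + 1 + 1) - (-(-2 : Int)).toNat = front.length := by omega
  rw [h3]
  simp only [Option.bind_some]
  rw [List.getElem?_append_right (by omega)]
  simp

theorem pvSlice_neg2 {α : Type} (front : List α) (m e : α) :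
    PySem.List.slice (front ++ [m, e]) none (some (-2)) = front := by
  simp only [PySem.List.slice, PySem.List.clampIdx, List.length_append, List.length_cons,
    List.length_nil]
  split_ifs with h1 h2 <;> try (exfalso; omega)
  have h3 : (((front.length + (0 + 1 + 1) : Nat) : Int) + -2).toNat - 0 = front.length := by omega
  rw [h3]
  simp [List.take_left']

theorem pvSlice_strip_suffix {α : Type} (a suf : List α) (h0 : suf ≠ []) :
    PySem.List.slice (a ++ suf) none (some (-(suf.length : Int))) = a := by
  have hlen : 1 ≤ suf.length := List.length_pos_iff.mpr h0
  simp only [PySem.List.slice, PySem.List.clampIdx, List.length_append]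
  split_ifs with h1 h2 <;> try (exfalso; omega)
  have h3 : (((a.length + suf.length : Nat) : Int) + -(suf.length : Int)).toNat - 0 = a.length := by
    omega
  rw [h3]
  simp [List.take_left']

-- if name ends with '.' m '.' e (m, e dot-free), the split of name is (split of the stem) ++ [m, e]
theorem pvEndswith_split (name m e : List Char) (hm : '.' ∉ m) (he : '.' ∉ e)
    (h : PySem.Chars.endswith name ('.' :: (m ++ '.' :: e)) = true) :
    ∃ a, name = a ++ '.' :: (m ++ '.' :: e) ∧
      pvSplit '.' [] name = pvSplit '.' [] a ++ [m, e] := by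
  rw [PySem.Chars.endswith_iff] at h
  obtain ⟨a, ha⟩ := h
  refine ⟨a, ha.symm, ?_⟩
  rw [← ha]
  have h2 : a ++ '.' :: (m ++ '.' :: e) = (a ++ '.' :: m) ++ '.' :: e := by simp
  rw [h2, pvSplit_append '.' e he, pvSplit_append '.' m hm]
  simp

-- the condition B's if tests, phrased on pvSplit
def pvCond (name : List Char) : Prop :=
  3 ≤ (pvSplit '.' [] name).length ∧
    (PySem.List.pyGet? (pvSplit '.' [] name) (-2)).getD [] ∈ ["test".toList, "spec".toList] ∧
    (PySem.List.pyGet? (pvSplit '.' [] name) (-1)).getD [] ∈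
      ["ts".toList, "js".toList, "tsx".toList, "jsx".toList]

theorem pvEndswith_cond (name m e : List Char) (hm : '.' ∉ m) (he : '.' ∉ e)
    (hm' : m ∈ ["test".toList, "spec".toList])
    (he' : e ∈ ["ts".toList, "js".toList, "tsx".toList, "jsx".toList])
    (h : PySem.Chars.endswith name ('.' :: (m ++ '.' :: e)) = true) :
    pvCond name := by
  obtain ⟨a, _, hsp⟩ := pvEndswith_split name m e hm he h
  have h2 : (PySem.List.pyGet? (pvSplit '.' [] name) (-2)).getD [] = m := by
    rw [hsp, pvGet_neg2]; rfl
  have h1 : (PySem.List.pyGet? (pvSplit '.' [] name) (-1)).getD [] = e := by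
    rw [hsp, pvGet_neg1]; rfl
  refine ⟨?_, by rw [h2]; exact hm', by rw [h1]; exact he'⟩
  rw [hsp]
  have hne : 1 ≤ (pvSplit '.' [] a).length := by
    cases hq : pvSplit '.' [] a
    · exact absurd hq (pvSplit_ne_nil '.' a [])
    · simp [hq]
  simp
  omega

-- the value A's loop returns for a firing suffix
def pvAVal (parts : List (List Char)) (name suf : List Char) : Option String :=
  some (String.ofList (PySem.Chars.join ['/']
    (((PySem.List.slice parts none (some (-1))).filter
        (fun p => !decide (p ∈ ["__tests__".toList, "test".toList, "tests".toList, "spec".toList]))) ++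
      [PySem.List.slice name none (some (-(suf.length : Int))) ++
        '.' :: (PySem.List.pyGet? (PySem.Chars.splitOn suf ['.']) (-1)).getD []])))

theorem pvLoop_none (parts : List (List Char)) (name : List Char) :
    ∀ sufs, (∀ s ∈ sufs, PySem.Chars.endswith name s = false) →
      pvJsLoopA parts name sufs = none := by
  intro sufs
  induction sufs with
  | nil => intro _; rfl
  | cons s t ih =>
    intro h
    rw [pvJsLoopA, if_neg (by rw [h s (List.mem_cons_self ..)]; simp)]
    exact ih (fun s' hs' => h s' (List.mem_cons_of_mem _ hs'))

theorem pvLoop_fire (parts : List (List Char)) (name suf : List Char)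
    (hT : PySem.Chars.endswith name suf = true) :
    ∀ sufs, suf ∈ sufs →
      (∀ s ∈ sufs, s ≠ suf → PySem.Chars.endswith name s = false) →
      pvJsLoopA parts name sufs = pvAVal parts name suf := by
  intro sufs
  induction sufs with
  | nil => intro h; simp at h
  | cons s t ih =>
    intro hmem hF
    by_cases hs : s = suf
    · subst hs
      rw [pvJsLoopA, if_pos hT]
      rfl
    · rw [pvJsLoopA, if_neg (by rw [hF s (List.mem_cons_self ..) hs]; simp)]
      refine ih ?_ (fun s' hs' => hF s' (List.mem_cons_of_mem _ hs'))
      rcases List.mem_cons.mp hmem with h | h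
      · exact absurd h.symm hs
      · exact h

-- the 8 suffixes, with their (m, e) decomposition
theorem pvSuffix_shape : ∀ suf ∈ pvSuffixes, ∃ m e,
    suf = '.' :: (m ++ '.' :: e) ∧ '.' ∉ m ∧ '.' ∉ e ∧
      m ∈ ["test".toList, "spec".toList] ∧
      e ∈ ["ts".toList, "js".toList, "tsx".toList, "jsx".toList] := by
  intro suf hsuf
  simp only [pvSuffixes, List.mem_cons, List.not_mem_nil, or_false] at hsuf
  rcases hsuf with rfl | rfl | rfl | rfl | rfl | rfl | rfl | rfl
  · exact ⟨"test".toList, "ts".toList, by decide, by decide, by decide, by decide, by decide⟩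
  · exact ⟨"test".toList, "js".toList, by decide, by decide, by decide, by decide, by decide⟩
  · exact ⟨"spec".toList, "ts".toList, by decide, by decide, by decide, by decide, by decide⟩
  · exact ⟨"spec".toList, "js".toList, by decide, by decide, by decide, by decide, by decide⟩
  · exact ⟨"test".toList, "tsx".toList, by decide, by decide, by decide, by decide, by decide⟩
  · exact ⟨"test".toList, "jsx".toList, by decide, by decide, by decide, by decide, by decide⟩
  · exact ⟨"spec".toList, "tsx".toList, by decide, by decide, by decide, by decide, by decide⟩
  · exact ⟨"spec".toList, "jsx".toList, by decide, by decide, by decide, by decide, by decide⟩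

theorem pvBaseExt (m e : List Char) (hm : '.' ∉ m) (he : '.' ∉ e) :
    (PySem.List.pyGet? (PySem.Chars.splitOn ('.' :: (m ++ '.' :: e)) ['.']) (-1)).getD [] = e := by
  rw [pvSplitOn_eq,
    show pvSplit '.' [] ('.' :: (m ++ '.' :: e)) = [] :: pvSplit '.' [] (m ++ '.' :: e) from by
      simp [pvSplit],
    pvSplit_append '.' e he, pvSplit_no_sep '.' m [] hm,
    show ([] :: ([[] ++ m] ++ [e]) : List (List Char)) = [[], [] ++ m] ++ [[] ++ m, e].tail from rfl]
  rw [show ([[], [] ++ m] ++ [[] ++ m, e].tail : List (List Char)) = [[]] ++ [[] ++ m, e] from by simp]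
  rw [pvGet_neg1]
  simp

-- main lemma: the two JS branches agree for every name and parts
theorem pvJs_eq (parts : List (List Char)) (name : List Char) :
    pvJsLoopA parts name pvSuffixes =
      (if 3 ≤ (PySem.Chars.splitOn name ['.']).length ∧
          (PySem.List.pyGet? (PySem.Chars.splitOn name ['.']) (-2)).getD [] ∈
            ["test".toList, "spec".toList] ∧
          (PySem.List.pyGet? (PySem.Chars.splitOn name ['.']) (-1)).getD [] ∈
            ["ts".toList, "js".toList, "tsx".toList, "jsx".toList] then
        some (String.ofList (PySem.Chars.join ['/']
          (((PySem.List.slice parts none (some (-1))).filter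
            (fun p => !decide (p ∈ ["__tests__".toList, "test".toList, "tests".toList, "spec".toList]))) ++
          [PySem.Chars.join ['.'] (PySem.List.slice (PySem.Chars.splitOn name ['.']) none (some (-2))) ++
            '.' :: (PySem.List.pyGet? (PySem.Chars.splitOn name ['.']) (-1)).getD []])))
      else none) := by
  rw [pvSplitOn_eq]
  by_cases hc : pvCond name
  · have hc' : 3 ≤ (pvSplit '.' [] name).length ∧
        (PySem.List.pyGet? (pvSplit '.' [] name) (-2)).getD [] ∈ ["test".toList, "spec".toList] ∧
        (PySem.List.pyGet? (pvSplit '.' [] name) (-1)).getD [] ∈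
          ["ts".toList, "js".toList, "tsx".toList, "jsx".toList] := hc
    rw [if_pos hc']
    obtain ⟨hlen, hm', he'⟩ := hc'
    obtain ⟨front, m, e, hdp, hfr⟩ := pvConcat2 _ hlen
    have hm2 : (PySem.List.pyGet? (pvSplit '.' [] name) (-2)).getD [] = m := by
      rw [hdp, pvGet_neg2]; rfl
    have he1 : (PySem.List.pyGet? (pvSplit '.' [] name) (-1)).getD [] = e := by
      rw [hdp, pvGet_neg1]; rfl
    rw [hm2] at hm'
    rw [he1] at he'
    -- name = (join of front) ++ '.' m '.' e
    have hname : name = PySem.Chars.join ['.'] front ++ '.' :: (m ++ '.' :: e) := by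
      have hj := pvJoin_pvSplit '.' name []
      rw [hdp, pvJoin_concat2 '.' m e front hfr] at hj
      simpa using hj.symm
    have hendT : PySem.Chars.endswith name ('.' :: (m ++ '.' :: e)) = true := by
      rw [PySem.Chars.endswith_iff]
      exact ⟨PySem.Chars.join ['.'] front, hname.symm⟩
    -- a suffix that fires must decompose to (m, e)
    have huniq : ∀ m' e', '.' ∉ m' → '.' ∉ e' →
        PySem.Chars.endswith name ('.' :: (m' ++ '.' :: e')) = true → m' = m ∧ e' = e := by
      intro m' e' hm'' he'' hE
      obtain ⟨a, _, hsp⟩ := pvEndswith_split name m' e' hm'' he'' hE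
      have g2 := hm2; have g1 := he1
      rw [hsp, pvGet_neg2] at g2
      rw [hsp, pvGet_neg1] at g1
      exact ⟨g2, g1⟩
    -- every non-matching suffix fails
    have hF : ∀ s ∈ pvSuffixes, s ≠ ('.' :: (m ++ '.' :: e)) →
        PySem.Chars.endswith name s = false := by
      intro s hs hne
      obtain ⟨m', e', rfl, hm'', he'', _, _⟩ := pvSuffix_shape s hs
      by_contra hE
      have hE' : PySem.Chars.endswith name ('.' :: (m' ++ '.' :: e')) = true := by
        simpa using hE
      obtain ⟨rfl, rfl⟩ := huniq m' e' hm'' he'' hE'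
      exact hne rfl
    simp only [List.mem_cons, List.not_mem_nil, or_false] at hm' he'
    have hmdot : '.' ∉ m := by rcases hm' with rfl | rfl <;> decide
    have hedot : '.' ∉ e := by rcases he' with rfl | rfl | rfl | rfl <;> decide
    have hmemsuf : ('.' :: (m ++ '.' :: e)) ∈ pvSuffixes := by
      rcases hm' with rfl | rfl <;> rcases he' with rfl | rfl | rfl | rfl <;> decide
    rw [pvLoop_fire parts name _ hendT pvSuffixes hmemsuf hF]
    unfold pvAVal
    rw [hdp, pvSlice_neg2, pvGet_neg1, hname, pvSlice_strip_suffix _ _ (List.cons_ne_nil _ _),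
      pvBaseExt m e hmdot hedot]
    rfl
  · have hc' : ¬ (3 ≤ (pvSplit '.' [] name).length ∧
        (PySem.List.pyGet? (pvSplit '.' [] name) (-2)).getD [] ∈ ["test".toList, "spec".toList] ∧
        (PySem.List.pyGet? (pvSplit '.' [] name) (-1)).getD [] ∈
          ["ts".toList, "js".toList, "tsx".toList, "jsx".toList]) := hc
    rw [if_neg hc']
    apply pvLoop_none
    intro s hs
    obtain ⟨m', e', rfl, hm'', he'', hmS, heS⟩ := pvSuffix_shape s hs
    by_contra hE
    have hE' : PySem.Chars.endswith name ('.' :: (m' ++ '.' :: e')) = true := by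
      simpa using hE
    exact hc (pvEndswith_cond name m' e' hm'' he'' hmS heS hE')

-- ===== VERDICT (by name: the statement is the Claim_ definition above) =====
theorem guess_tested_file_py_spec : Claim_equal_guess_tested_file_py := by
  intro test_path _
  unfold Spec_guess_tested_file_py guess_tested_file_py guess_tested_file_py_alt
  dsimp only
  split_ifs with h h2 h2
  · rfl
  · rw [pvJs_eq, if_pos h2]
  · rw [pvJs_eq, if_neg h2]
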